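-- pv_equiv track=rewrite | github.com/sutazai/sutazaiapp | brain/evaluator/quality_evaluator.py | _extract_ranking
-- ===== SOURCE A (Python) =====
-- from typing import Dict, List, Any, Optional
--
-- def _extract_ranking(
--
--     comparison_response: str,
--     results: List[Dict[str, Any]]
-- ) -> List[str]:
--     """Extract agent ranking from comparison response"""
--     agent_names = [r['agent'] for r in results]
--
--     # Simple extraction based on order mentioned
--     ranking = []
--     response_lower = comparison_response.lower()
--
--     for agent in agent_names:
--         if agent.lower() in response_lower:
--             if agent not in ranking:
--                 ranking.append(agent)
--
--     # Add any missing agents at the end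
--     for agent in agent_names:
--         if agent not in ranking:
--             ranking.append(agent)
--
--     return ranking
-- ===== SOURCE B (Python) =====
-- from typing import Dict, List, Any
--
-- def _extract_ranking(
--     comparison_response: str,
--     results: List[Dict[str, Any]]
-- ) -> List[str]:
--     """Extract agent ranking from comparison response (single classifying pass)."""
--     response_lower = comparison_response.lower()
--     present: List[str] = []
--     absent: List[str] = []
--     for r in results:
--         agent = r['agent']
--         if agent.lower() in response_lower:
--             if agent not in present:
--                 present.append(agent)
--         elif agent not in absent:
--             absent.append(agent)
--     return present + absent
-- ===== Notes on version B (the rewrite author's own statement) =====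
-- stated objective: simpler
-- what changed: Replaces A's two sequential scans over a precomputed agent_names list (mentioned-first pass, then a fill-in pass re-scanning the growing ranking) by one classifying pass over results that appends each agent to a 'present' or 'absent' list with per-group dedup and returns present + absent.
import Mathlib
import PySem

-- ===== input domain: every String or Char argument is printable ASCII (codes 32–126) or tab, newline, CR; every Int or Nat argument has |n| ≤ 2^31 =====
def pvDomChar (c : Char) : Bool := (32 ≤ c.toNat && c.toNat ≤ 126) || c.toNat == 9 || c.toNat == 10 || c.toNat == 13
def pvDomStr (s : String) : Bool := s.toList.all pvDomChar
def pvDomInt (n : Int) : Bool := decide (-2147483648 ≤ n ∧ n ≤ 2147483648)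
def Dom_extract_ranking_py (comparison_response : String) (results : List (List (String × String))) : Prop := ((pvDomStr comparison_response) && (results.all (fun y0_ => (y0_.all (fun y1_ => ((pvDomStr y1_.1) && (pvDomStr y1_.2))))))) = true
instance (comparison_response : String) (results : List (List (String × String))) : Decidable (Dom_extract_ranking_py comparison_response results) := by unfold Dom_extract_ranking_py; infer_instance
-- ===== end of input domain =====

-- B replaces A's two sequential scans (mentioned-first pass, then fill-in pass) by one
-- classifying pass into a 'present' and an 'absent' list, returned as present ++ absent (objective: simpler).


-- ===== PORT A =====
-- r['agent'] : first match in the association list; Pre_ guarantees the key exists (KeyError excluded)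
def pvAgent (r : List (String × String)) : String :=
  ((PySem.Dict.mk r).get? "agent").getD ""

def extract_ranking_py (comparison_response : String) (results : List (List (String × String))) : List String :=
  let agent_names := results.map pvAgent
  let response_lower := PySem.Str.lower comparison_response
  let ranking := agent_names.foldl (fun ranking agent =>
      if PySem.Str.isIn (PySem.Str.lower agent) response_lower = true then
        (if agent ∈ ranking then ranking else ranking ++ [agent])
      else ranking) []
  agent_names.foldl (fun ranking agent =>
      if agent ∈ ranking then ranking else ranking ++ [agent]) ranking

-- ===== PORT B =====
def extract_ranking_py_alt (comparison_response : String) (results : List (List (String × String))) : List String :=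
  let response_lower := PySem.Str.lower comparison_response
  let pa := results.foldl (fun (pa : List String × List String) r =>
      let agent := pvAgent r
      if PySem.Str.isIn (PySem.Str.lower agent) response_lower = true then
        (if agent ∈ pa.1 then pa.1 else pa.1 ++ [agent], pa.2)
      else
        (pa.1, if agent ∈ pa.2 then pa.2 else pa.2 ++ [agent])) ([], [])
  pa.1 ++ pa.2

-- ===== PRECONDITION & SPEC =====
-- Pre_ excludes exactly the inputs where some result dict lacks key 'agent' (Python A raises KeyError there)
def Pre_extract_ranking_py (comparison_response : String) (results : List (List (String × String))) : Prop :=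
  ∀ r ∈ results, ((PySem.Dict.mk r).get? "agent").isSome = true
instance (comparison_response : String) (results : List (List (String × String))) : Decidable (Pre_extract_ranking_py comparison_response results) := by unfold Pre_extract_ranking_py; infer_instance

def pvWitness_extract_ranking_py : String × (List (List (String × String))) :=
  ("Alpha is best", [[("agent", "Alpha")], [("agent", "beta")]])

def Spec_extract_ranking_py (comparison_response : String) (results : List (List (String × String))) (out : List String) : Prop := out = extract_ranking_py_alt comparison_response results
instance (comparison_response : String) (results : List (List (String × String))) (out : List String) : Decidable (Spec_extract_ranking_py comparison_response results out) := by unfold Spec_extract_ranking_py; infer_instance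

-- ===== CLAIM (what is proved, stated in full; the proofs are below) =====
def Claim_equal_extract_ranking_py : Prop := ∀ (comparison_response : String) (results : List (List (String × String))), Dom_extract_ranking_py comparison_response results → Pre_extract_ranking_py comparison_response results → Spec_extract_ranking_py comparison_response results (extract_ranking_py comparison_response results)

-- ===== LEMMAS AND PROOFS =====

theorem pv_add_eq (s : List String) (a : String) :
    PySem.Set.add s a = if a ∈ s then s else s ++ [a] := by
  by_cases h : a ∈ s <;> simp [PySem.Set.add, h]

theorem pv_foldl_dedup (xs s : List String) :
    xs.foldl (fun r a => if a ∈ r then r else r ++ [a]) s = xs.foldl PySem.Set.add s := by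
  induction xs generalizing s with
  | nil => rfl
  | cons a xs ih => simp [List.foldl_cons, pv_add_eq, ih]

theorem pv_foldl_guard (q : String → Bool) (xs s : List String) :
    xs.foldl (fun r a => if q a = true then (if a ∈ r then r else r ++ [a]) else r) s
      = (xs.filter q).foldl PySem.Set.add s := by
  induction xs generalizing s with
  | nil => rfl
  | cons a xs ih =>
    by_cases h : q a = true <;> simp [h, pv_add_eq, ih]

theorem pv_mem_foldl_add (xs s : List String) (x : String) :
    x ∈ xs.foldl PySem.Set.add s ↔ x ∈ s ∨ x ∈ xs := by
  induction xs generalizing s with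
  | nil => simp
  | cons a xs ih => simp [List.foldl_cons, ih, PySem.Set.mem_add]; tauto

theorem pv_filter_foldl_add (p : String → Bool) (xs s : List String) :
    (xs.foldl PySem.Set.add s).filter p = (xs.filter p).foldl PySem.Set.add (s.filter p) := by
  induction xs generalizing s with
  | nil => rfl
  | cons a xs ih =>
    rw [List.foldl_cons, ih, List.filter_cons]
    by_cases hp : p a = true
    · simp only [hp, if_pos, List.foldl_cons]
      congr 1
      rw [pv_add_eq, pv_add_eq]
      by_cases h : a ∈ s
      · simp [h, List.mem_filter, hp]
      · simp [h, List.mem_filter, List.filter_append, hp]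
    · simp only [hp]
      congr 1
      rw [pv_add_eq]
      by_cases h : a ∈ s <;> simp [h, List.filter_append, hp]

theorem pv_pair_fold (q : String → Bool) (xs : List String) (p ab : List String) :
    xs.foldl (fun (pa : List String × List String) a =>
        if q a = true then
          (if a ∈ pa.1 then pa.1 else pa.1 ++ [a], pa.2)
        else
          (pa.1, if a ∈ pa.2 then pa.2 else pa.2 ++ [a])) (p, ab)
      = ((xs.filter q).foldl PySem.Set.add p,
         (xs.filter (fun a => !(q a))).foldl PySem.Set.add ab) := by
  induction xs generalizing p ab with
  | nil => rfl
  | cons a xs ih =>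
    by_cases h : q a = true <;>
      simp [List.filter_cons, h, ih, pv_add_eq]

theorem pv_main (q : String → Bool) (names : List String) :
    names.foldl PySem.Set.add ((names.filter q).foldl PySem.Set.add [])
      = (names.filter q).foldl PySem.Set.add []
        ++ (names.filter (fun a => !(q a))).foldl PySem.Set.add [] := by
  have hofl : ∀ (xs : List String), xs.foldl PySem.Set.add ([] : List String) = PySem.Set.ofList xs := by
    intro xs; rw [PySem.Set.ofList_eq_foldl]
  set P := (names.filter q).foldl PySem.Set.add ([] : List String) with hP
  have hupd : names.foldl PySem.Set.add P = PySem.Set.update P names := rfl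
  rw [hupd, PySem.Set.update_eq_append_filter]
  congr 1
  have hF := pv_filter_foldl_add (fun a => !(q a)) names []
  simp only [List.filter_nil] at hF
  rw [← hF, hofl]
  apply List.filter_congr
  intro y hy
  have hyn : y ∈ names := by
    rw [← hofl] at hy
    exact ((pv_mem_foldl_add names [] y).mp hy).resolve_left (by simp)
  have hmem : y ∈ P ↔ (y ∈ names ∧ q y = true) := by
    rw [hP, pv_mem_foldl_add]; simp [List.mem_filter]
  have hc : PySem.Set.contains P y = q y := by
    by_cases hq : q y = true
    · have h1 : PySem.Set.contains P y = true := (PySem.Set.contains_iff P y).mpr (hmem.mpr ⟨hyn, hq⟩)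
      rw [h1, hq]
    · have hnm : y ∉ P := fun h => hq (hmem.mp h).2
      have : ¬ PySem.Set.contains P y = true := fun h => hnm ((PySem.Set.contains_iff P y).mp h)
      simp only [Bool.not_eq_true] at this hq
      rw [this, hq]
  rw [hc]

-- ===== VERDICT (by name: the statement is the Claim_ definition above) =====
theorem extract_ranking_py_spec : Claim_equal_extract_ranking_py := by
  intro cr results _ _
  unfold Spec_extract_ranking_py
  simp only [extract_ranking_py, extract_ranking_py_alt]
  have hm := List.foldl_map (l := results) (f := pvAgent)
    (g := fun (pa : List String × List String) agent =>
      if PySem.Str.isIn (PySem.Str.lower agent) (PySem.Str.lower cr) = true then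
        (if agent ∈ pa.1 then pa.1 else pa.1 ++ [agent], pa.2)
      else
        (pa.1, if agent ∈ pa.2 then pa.2 else pa.2 ++ [agent]))
    (init := (([] : List String), ([] : List String)))
  rw [← hm]
  rw [pv_pair_fold (fun a => PySem.Str.isIn (PySem.Str.lower a) (PySem.Str.lower cr))]
  rw [pv_foldl_guard, pv_foldl_dedup, pv_main]
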